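-- pv_equiv track=rewrite | github.com/daaaaaayoon/Algorithm | src/pgm/weekly_challenge/Solution_week1.py | solution
-- ===== SOURCE A (Python) =====
-- def solution(price, money, count):
--     answer = 0
--     need = 0
--     for i in range(count):
--         need += price*(i+1)
--     if need > money:
--         answer = need - money
--     return answer
-- ===== SOURCE B (Python) =====
-- def solution(price, money, count):
--     # closed form: sum of price*1..price*count is price * count*(count+1)//2
--     need = price * (count * (count + 1) // 2) if count > 0 else 0
--     return max(0, need - money)
-- ===== Notes on version B (the rewrite author's own statement) =====
-- stated objective: faster
-- what changed: Replaces the O(count) summation loop with the arithmetic-series closed form price*count*(count+1)//2 and a max.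
import Mathlib
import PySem

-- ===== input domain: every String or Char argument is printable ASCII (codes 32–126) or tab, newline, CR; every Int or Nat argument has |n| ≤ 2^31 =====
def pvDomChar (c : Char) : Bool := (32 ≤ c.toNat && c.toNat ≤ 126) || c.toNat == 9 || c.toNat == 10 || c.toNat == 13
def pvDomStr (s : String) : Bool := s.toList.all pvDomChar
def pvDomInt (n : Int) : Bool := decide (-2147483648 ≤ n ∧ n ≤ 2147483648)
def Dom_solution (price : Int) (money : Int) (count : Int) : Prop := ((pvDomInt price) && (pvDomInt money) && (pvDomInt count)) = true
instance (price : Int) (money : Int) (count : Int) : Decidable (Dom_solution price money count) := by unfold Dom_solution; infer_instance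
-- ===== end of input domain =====

-- B replaces A's O(count) summation loop with the O(1) arithmetic-series closed form.

-- ===== PORT A =====
-- literal transliteration of A: accumulate need over range(count), then branch
def solution (price : Int) (money : Int) (count : Int) : Int :=
  let answer : Int := 0
  let need : Int := 0
  let need := (PySem.List.pyRange 0 count 1).foldl (fun need i => need + price * (i + 1)) need
  let answer := if need > money then need - money else answer
  answer

-- ===== PORT B =====
-- literal transliteration of B: closed form + max
def solution_alt (price : Int) (money : Int) (count : Int) : Int :=
  let need : Int := if count > 0 then price * (PySem.Int.floordiv (count * (count + 1)) 2) else 0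
  max 0 (need - money)

-- ===== PRECONDITION & SPEC =====
def Spec_solution (price : Int) (money : Int) (count : Int) (out : Int) : Prop := out = solution_alt price money count
instance (price : Int) (money : Int) (count : Int) (out : Int) : Decidable (Spec_solution price money count out) := by unfold Spec_solution; infer_instance

-- ===== CLAIM (what is proved, stated in full; the proofs are below) =====
def Claim_equal_solution : Prop := ∀ (price : Int) (money : Int) (count : Int), Dom_solution price money count → Spec_solution price money count (solution price money count)

-- ===== LEMMAS AND PROOFS =====

-- A's loop computes the triangular closed form (Int ediv, exact since n*(n+1) is even).
theorem pv_foldl_need (price : Int) (n : Nat) (a : Int) :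
    (PySem.List.pyRange 0 (n : Int) 1).foldl (fun need i => need + price * (i + 1)) a
      = a + price * (((n : Int) * ((n : Int) + 1)) / 2) := by
  induction n generalizing a with
  | zero => simp [PySem.List.pyRange_one_eq_nil]
  | succ k ih =>
    have hsplit : PySem.List.pyRange 0 ((k : Int) + 1) 1
        = PySem.List.pyRange 0 (k : Int) 1 ++ [(k : Int)] :=
      PySem.List.pyRange_one_succ_right (by exact_mod_cast Nat.zero_le k)
    have hdiv : (((k : Int) + 1) * (((k : Int) + 1) + 1)) / 2
        = ((k : Int) * ((k : Int) + 1)) / 2 + ((k : Int) + 1) := by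
      have h1 : ((k : Int) + 1) * (((k : Int) + 1) + 1)
          = (k : Int) * ((k : Int) + 1) + ((k : Int) + 1) * 2 := by ring
      rw [h1, Int.add_mul_ediv_right _ _ (by norm_num : (2 : Int) ≠ 0)]
    push_cast
    rw [hsplit, List.foldl_append, ih]
    simp only [List.foldl_cons, List.foldl_nil]
    rw [hdiv]; ring

theorem pv_solution_eq (price money count : Int) :
    solution price money count = solution_alt price money count := by
  unfold solution solution_alt
  dsimp only
  by_cases hc : count > 0
  · obtain ⟨n, hn⟩ : ∃ n : Nat, count = (n : Int) :=
      ⟨count.toNat, by omega⟩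
    subst hn
    rw [pv_foldl_need,
      PySem.Int.floordiv_eq_ediv_of_pos (by norm_num : (0:Int) < 2)]
    simp only [if_pos hc]
    omega
  · have hnil : PySem.List.pyRange 0 count 1 = [] :=
      PySem.List.pyRange_one_eq_nil (by omega)
    rw [hnil]
    simp only [List.foldl_nil, if_neg hc]
    omega

-- ===== VERDICT (by name: the statement is the Claim_ definition above) =====
theorem solution_spec : Claim_equal_solution := by
  intro price money count _
  exact pv_solution_eq price money count
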